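-- pv_equiv track=rewrite | github.com/xiaobaiyigebudongjishu/MMMGAMAGAE | desktop_qt_ui/main_view_parts/env_management.py | _split_env_key
-- ===== SOURCE A (Python) =====
-- def _split_env_key(env_key: str) -> tuple[str, str, str]:
--     normalized_key = (env_key or "").upper()
--     scope = ""
--     for prefix in ("OCR_", "COLOR_", "RENDER_"):
--         if normalized_key.startswith(prefix):
--             scope = prefix
--             normalized_key = normalized_key[len(prefix):]
--             break
--
--     for provider in ("CUSTOM_OPENAI", "OPENAI", "GEMINI", "DEEPSEEK", "GROQ", "SAKURA"):
--         provider_prefix = f"{provider}_"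
--         if normalized_key.startswith(provider_prefix):
--             field = normalized_key[len(provider_prefix):]
--             return scope, provider, field
--
--     return scope, "", normalized_key
-- ===== SOURCE B (Python) =====
-- def _split_env_key(env_key: str) -> tuple[str, str, str]:
--     toks = (env_key or "").upper().split("_")
--     scope = ""
--     if len(toks) > 1 and toks[0] in ("OCR", "COLOR", "RENDER"):
--         scope = toks[0] + "_"
--         toks = toks[1:]
--     if len(toks) > 2 and toks[0] == "CUSTOM" and toks[1] == "OPENAI":
--         return scope, "CUSTOM_OPENAI", "_".join(toks[2:])
--     if len(toks) > 1 and toks[0] in ("OPENAI", "GEMINI", "DEEPSEEK", "GROQ", "SAKURA"):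
--         return scope, toks[0], "_".join(toks[1:])
--     return scope, "", "_".join(toks)
-- ===== Notes on version B (the rewrite author's own statement) =====
-- stated objective: alternative
-- what changed: B splits the uppercased key into '_'-separated tokens once and classifies the leading tokens (with length checks) instead of A's sequential startswith prefix tests and slicing; fields are rebuilt by joining the remaining tokens.
import Mathlib
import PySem

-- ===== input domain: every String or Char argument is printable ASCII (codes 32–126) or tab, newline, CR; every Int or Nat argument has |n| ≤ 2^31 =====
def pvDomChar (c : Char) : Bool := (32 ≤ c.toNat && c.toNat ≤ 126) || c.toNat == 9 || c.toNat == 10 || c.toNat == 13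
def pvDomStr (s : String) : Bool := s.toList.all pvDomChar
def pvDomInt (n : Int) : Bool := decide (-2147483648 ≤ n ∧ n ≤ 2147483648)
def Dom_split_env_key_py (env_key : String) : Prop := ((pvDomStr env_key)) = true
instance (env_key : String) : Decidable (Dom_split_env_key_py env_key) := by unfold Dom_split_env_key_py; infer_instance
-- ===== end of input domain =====

-- B replaces A's chain of startswith/slice prefix tests by one tokenization on '_' and
-- classification of the leading tokens (objective: alternative decomposition, same cost).

-- ===== PORT A =====
-- the tuple of scope prefixes A's first loop ranges over
def pvSCOPES : List (List Char) := ["OCR_".toList, "COLOR_".toList, "RENDER_".toList]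
-- the tuple of providers A's second loop ranges over
def pvPROVS : List (List Char) :=
  ["CUSTOM_OPENAI".toList, "OPENAI".toList, "GEMINI".toList, "DEEPSEEK".toList,
   "GROQ".toList, "SAKURA".toList]

-- A's first for-loop: find a scope prefix, strip it, break
def pvScopeLoop : List (List Char) → List Char → List Char × List Char
  | [], k => ([], k)
  | p :: ps, k =>
      if PySem.Chars.startswith k p then
        (p, PySem.Chars.slice k (some (p.length : Int)) none)
      else pvScopeLoop ps k

-- A's second for-loop: return from inside the loop on the first provider-prefix match
def pvProvLoop : List (List Char) → List Char → List Char → String × String × String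
  | [], scope, k => (String.ofList scope, String.ofList [], String.ofList k)
  | pr :: prs, scope, k =>
      if PySem.Chars.startswith k (pr ++ ['_']) then
        (String.ofList scope, String.ofList pr,
         String.ofList (PySem.Chars.slice k (some (((pr ++ ['_']).length : Nat) : Int)) none))
      else pvProvLoop prs scope k

def split_env_key_py (env_key : String) : String × String × String :=
  -- (env_key or "").upper(): the empty string is falsy, so this is upper of env_key either way
  let normalized := PySem.Chars.upper (if env_key.toList = [] then [] else env_key.toList)
  let sc := pvScopeLoop pvSCOPES normalized
  pvProvLoop pvPROVS sc.1 sc.2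

-- ===== PORT B =====
-- Source B helper _provider_stage(scope, toks)
def pvStage2 (scope : List Char) (toks : List (List Char)) : String × String × String :=
  if toks.length > 2 ∧ toks.getD 0 [] = "CUSTOM".toList ∧ toks.getD 1 [] = "OPENAI".toList then
    (String.ofList scope, "CUSTOM_OPENAI", String.ofList (List.intercalate ['_'] (toks.drop 2)))
  else if toks.length > 1 ∧ (toks.getD 0 [] = "OPENAI".toList ∨ toks.getD 0 [] = "GEMINI".toList
      ∨ toks.getD 0 [] = "DEEPSEEK".toList ∨ toks.getD 0 [] = "GROQ".toList
      ∨ toks.getD 0 [] = "SAKURA".toList) then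
    (String.ofList scope, String.ofList (toks.getD 0 []),
     String.ofList (List.intercalate ['_'] (toks.drop 1)))
  else
    (String.ofList scope, "", String.ofList (List.intercalate ['_'] toks))

def split_env_key_py_alt (env_key : String) : String × String × String :=
  -- toks = (env_key or "").upper().split("_")  (str.split on a 1-char separator = List.splitOn)
  let toks := (PySem.Chars.upper (if env_key.toList = [] then [] else env_key.toList)).splitOn '_'
  if toks.length > 1 ∧ (toks.getD 0 [] = "OCR".toList ∨ toks.getD 0 [] = "COLOR".toList
      ∨ toks.getD 0 [] = "RENDER".toList) then
    pvStage2 (toks.getD 0 [] ++ ['_']) (toks.drop 1)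
  else pvStage2 [] toks

-- ===== PRECONDITION & SPEC =====
def Spec_split_env_key_py (env_key : String) (out : String × String × String) : Prop := out = split_env_key_py_alt env_key
instance (env_key : String) (out : String × String × String) : Decidable (Spec_split_env_key_py env_key out) := by unfold Spec_split_env_key_py; infer_instance

-- ===== CLAIM (what is proved, stated in full; the proofs are below) =====
def Claim_equal_split_env_key_py : Prop := ∀ (env_key : String), Dom_split_env_key_py env_key → Spec_split_env_key_py env_key (split_env_key_py env_key)

-- ===== LEMMAS AND PROOFS =====

theorem pvSliceFrom (l : List Char) (n : Nat) :
    PySem.Chars.slice l (some (n : Int)) none = l.drop n := by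
  simp only [PySem.Chars.slice_eq_listSlice, PySem.List.slice_from_natCast]

theorem pvInterCons (h t : List Char) (ts : List (List Char)) :
    List.intercalate ['_'] (h :: t :: ts) = h ++ '_' :: List.intercalate ['_'] (t :: ts) := by
  simp [List.intercalate, List.intersperse_cons₂]

theorem pvInterSingle (h : List Char) : List.intercalate ['_'] [h] = h := by
  simp [List.intercalate]

theorem pvTokFree (l : List Char) : ∀ t ∈ l.splitOn '_', '_' ∉ t := by
  induction l with
  | nil => intro t ht; simp [List.splitOn] at ht; simp [ht]
  | cons c l ih =>
    intro t ht
    simp only [List.splitOn, List.splitOnP_cons] at ht ih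
    by_cases hc : c = '_'
    · subst hc; simp at ht
      rcases ht with rfl | ht
      · simp
      · exact ih t ht
    · rw [if_neg (by simp [hc])] at ht
      obtain ⟨h0, ts0, hsp⟩ := List.exists_cons_of_ne_nil (List.splitOnP_ne_nil _ l)
      rw [hsp] at ht
      simp only [List.modifyHead_cons, List.mem_cons] at ht
      rcases ht with rfl | ht
      · intro hmem
        rcases List.mem_cons.mp hmem with h1 | h1
        · exact hc h1.symm
        · exact ih h0 (by simp [hsp]) h1
      · exact ih t (by simp [hsp, ht])

theorem pvNoPrefix (p q h : List Char) (hh : '_' ∉ h) : ¬ (p ++ '_' :: q <+: h) := by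
  intro hpre
  exact hh (hpre.subset (by simp))

theorem pvM1 (p q h r : List Char) (hp : '_' ∉ p) (hh : '_' ∉ h) :
    (p ++ '_' :: q <+: h ++ '_' :: r) ↔ (p = h ∧ q <+: r) := by
  induction p generalizing h with
  | nil =>
    cases h with
    | nil => simp [List.cons_prefix_cons]
    | cons c h' =>
      have hc : ('_' : Char) ≠ c := fun e => hh (List.mem_cons.mpr (Or.inl e))
      simp [List.cons_prefix_cons, hc]
  | cons a p' ih =>
    have hp' : '_' ∉ p' := fun hm => hp (List.mem_cons_of_mem _ hm)
    have ha : a ≠ '_' := fun e => hp (List.mem_cons.mpr (Or.inl e.symm))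
    cases h with
    | nil =>
      simp [List.cons_prefix_cons, ha]
    | cons c h' =>
      have hh' : '_' ∉ h' := fun hm => hh (List.mem_cons_of_mem _ hm)
      rw [List.cons_append, List.cons_append, List.cons_prefix_cons, ih h' hp' hh']
      simp [List.cons.injEq, and_assoc]

theorem pvG (p q h : List Char) (ts : List (List Char)) (hp : '_' ∉ p) (hh : '_' ∉ h) :
    (p ++ '_' :: q <+: List.intercalate ['_'] (h :: ts)) ↔
      (p = h ∧ ts ≠ [] ∧ q <+: List.intercalate ['_'] ts) := by
  cases ts with
  | nil => simp [pvInterSingle, pvNoPrefix p q h hh]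
  | cons t ts' => rw [pvInterCons, pvM1 p q h _ hp hh]; simp

theorem pvDropLemma (p r : List Char) : (p ++ '_' :: r).drop (p.length + 1) = r := by
  have h1 : p ++ '_' :: r = (p ++ ['_']) ++ r := by simp
  have h2 : p.length + 1 = (p ++ ['_']).length := by simp
  rw [h1, h2, List.drop_left]

theorem pvOfNil : String.ofList [] = "" := by decide

-- the provider stage: A's return-from-loop over pvPROVS equals B's token classification
theorem pvProvEq (scope h : List Char) (ts : List (List Char)) (hh : '_' ∉ h)
    (hts : ∀ t ∈ ts, '_' ∉ t) :
    pvProvLoop pvPROVS scope (List.intercalate ['_'] (h :: ts)) = pvStage2 scope (h :: ts) := by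
  have hA : ∀ p : List Char, '_' ∉ p →
      ((PySem.Chars.startswith (List.intercalate ['_'] (h :: ts)) (p ++ ['_'])) = true ↔
        (p = h ∧ ts ≠ [])) := by
    intro p hp
    rw [PySem.Chars.startswith_iff]
    have := pvG p [] h ts hp hh
    simpa using this
  have hco : ((PySem.Chars.startswith (List.intercalate ['_'] (h :: ts))
        ("CUSTOM_OPENAI".toList ++ ['_'])) = true) ↔
      (h = "CUSTOM".toList ∧ ∃ t ts', ts = t :: ts' ∧ t = "OPENAI".toList ∧ ts' ≠ []) := by
    rw [PySem.Chars.startswith_iff]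
    rw [show ("CUSTOM_OPENAI".toList ++ ['_'] : List Char) =
        "CUSTOM".toList ++ '_' :: ("OPENAI".toList ++ '_' :: []) from by decide]
    rw [pvG _ _ _ _ (by decide) hh]
    constructor
    · rintro ⟨rfl, hne, hpre⟩
      obtain ⟨t, ts', rfl⟩ := List.exists_cons_of_ne_nil hne
      have ht := hts t (by simp)
      rw [pvG _ _ _ _ (by decide) ht] at hpre
      exact ⟨rfl, t, ts', rfl, hpre.1.symm, hpre.2.1⟩
    · rintro ⟨rfl, t, ts', rfl, rfl, hne⟩
      refine ⟨rfl, by simp, ?_⟩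
      rw [pvG _ _ _ _ (by decide) (hts _ (by simp))]
      exact ⟨rfl, hne, by simp⟩
  rcases ts with _ | ⟨t, ts'⟩
  · -- no second token: no provider prefix can match, B's length tests both fail
    simp only [pvPROVS, pvProvLoop, pvStage2]
    rw [if_neg (by rw [hco]; rintro ⟨-, t, ts', h1, -⟩; simp at h1),
        if_neg (by rw [hA _ (by decide)]; rintro ⟨-, h1⟩; exact h1 rfl),
        if_neg (by rw [hA _ (by decide)]; rintro ⟨-, h1⟩; exact h1 rfl),
        if_neg (by rw [hA _ (by decide)]; rintro ⟨-, h1⟩; exact h1 rfl),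
        if_neg (by rw [hA _ (by decide)]; rintro ⟨-, h1⟩; exact h1 rfl),
        if_neg (by rw [hA _ (by decide)]; rintro ⟨-, h1⟩; exact h1 rfl),
        if_neg (by rintro ⟨h1, -⟩; simp at h1),
        if_neg (by rintro ⟨h1, -⟩; simp at h1), pvOfNil]
  · have ht : '_' ∉ t := hts t (by simp)
    have hts' : ∀ u ∈ ts', '_' ∉ u := fun u hu => hts u (by simp [hu])
    by_cases h1 : h = "CUSTOM".toList
    · by_cases h2 : t = "OPENAI".toList
      · rcases ts' with _ | ⟨u, us⟩
        · -- "CUSTOM_OPENAI" with no third token: nothing matches on either side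
          subst h1; subst h2
          simp only [pvPROVS, pvProvLoop, pvStage2]
          rw [if_neg (by rw [hco]
                         rintro ⟨-, t', ts'', h3, -, h4⟩
                         injection h3 with h5 h6
                         exact h4 h6.symm),
              if_neg (by rw [hA _ (by decide)]; rintro ⟨h3, -⟩; exact absurd h3 (by decide)),
              if_neg (by rw [hA _ (by decide)]; rintro ⟨h3, -⟩; exact absurd h3 (by decide)),
              if_neg (by rw [hA _ (by decide)]; rintro ⟨h3, -⟩; exact absurd h3 (by decide)),
              if_neg (by rw [hA _ (by decide)]; rintro ⟨h3, -⟩; exact absurd h3 (by decide)),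
              if_neg (by rw [hA _ (by decide)]; rintro ⟨h3, -⟩; exact absurd h3 (by decide)),
              if_neg (by rintro ⟨h3, -⟩; simp at h3),
              if_neg (by rintro ⟨-, h3⟩
                         rcases h3 with h3 | h3 | h3 | h3 | h3 <;> exact absurd h3 (by decide)),
              pvOfNil]
        · -- the CUSTOM_OPENAI match
          subst h1; subst h2
          have hdrop : List.drop ("CUSTOM_OPENAI".toList ++ ['_']).length
              (List.intercalate ['_'] ("CUSTOM".toList :: "OPENAI".toList :: u :: us)) =
              List.intercalate ['_'] (u :: us) := by
            rw [pvInterCons, pvInterCons,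
                show ("CUSTOM".toList ++ '_' :: ("OPENAI".toList ++ '_' ::
                    List.intercalate ['_'] (u :: us)) : List Char) =
                  ("CUSTOM".toList ++ '_' :: "OPENAI".toList) ++ '_' ::
                    List.intercalate ['_'] (u :: us) from by simp,
                show ("CUSTOM_OPENAI".toList ++ ['_']).length =
                  ("CUSTOM".toList ++ '_' :: "OPENAI".toList).length + 1 from by decide,
                pvDropLemma]
          simp only [pvPROVS, pvProvLoop, pvStage2]
          rw [if_pos (by rw [hco]; exact ⟨rfl, "OPENAI".toList, u :: us, rfl, rfl, by simp⟩),
              if_pos ⟨by simp, by simp, by simp⟩,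
              pvSliceFrom, hdrop]
          simp only [List.drop_succ_cons, List.drop_zero, Prod.mk.injEq]
          refine ⟨trivial, by decide, trivial⟩
      · -- h = CUSTOM but second token is not OPENAI: nothing matches on either side
        subst h1
        simp only [pvPROVS, pvProvLoop, pvStage2]
        rw [if_neg (by rw [hco]
                       rintro ⟨-, t', ts'', h3, h4, -⟩
                       injection h3 with h5 h6
                       exact h2 (h5.trans h4)),
            if_neg (by rw [hA _ (by decide)]; rintro ⟨h3, -⟩; exact absurd h3 (by decide)),
            if_neg (by rw [hA _ (by decide)]; rintro ⟨h3, -⟩; exact absurd h3 (by decide)),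
            if_neg (by rw [hA _ (by decide)]; rintro ⟨h3, -⟩; exact absurd h3 (by decide)),
            if_neg (by rw [hA _ (by decide)]; rintro ⟨h3, -⟩; exact absurd h3 (by decide)),
            if_neg (by rw [hA _ (by decide)]; rintro ⟨h3, -⟩; exact absurd h3 (by decide)),
            if_neg (by rintro ⟨-, -, h3⟩; exact h2 (by simpa using h3)),
            if_neg (by rintro ⟨-, h3⟩
                       simp only [List.getD_cons_zero] at h3
                       rcases h3 with h3 | h3 | h3 | h3 | h3 <;> exact absurd h3 (by decide)),
            pvOfNil]
    · -- h ≠ CUSTOM: the CUSTOM_OPENAI test fails; try the five single-token providers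
      have hcof : ¬ ((PySem.Chars.startswith (List.intercalate ['_'] (h :: t :: ts'))
          ("CUSTOM_OPENAI".toList ++ ['_'])) = true) := by
        rw [hco]; rintro ⟨h3, -⟩; exact h1 h3
      have hb1 : ¬ (((h :: t :: ts').length > 2) ∧ (h :: t :: ts').getD 0 [] = "CUSTOM".toList ∧
          (h :: t :: ts').getD 1 [] = "OPENAI".toList) := by
        rintro ⟨-, h3, -⟩; exact h1 (by simpa using h3)
      by_cases hs : h = "OPENAI".toList ∨ h = "GEMINI".toList ∨ h = "DEEPSEEK".toList ∨
          h = "GROQ".toList ∨ h = "SAKURA".toList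
      · -- one single-token provider matches
        have hfield : ∀ p : List Char, p = h →
            PySem.Chars.slice (List.intercalate ['_'] (h :: t :: ts'))
              (some (((p ++ ['_']).length : Nat) : Int)) none = List.intercalate ['_'] (t :: ts') := by
          rintro p rfl
          rw [pvSliceFrom, pvInterCons, show (p ++ ['_']).length = p.length + 1 from by simp,
              pvDropLemma]
        have hmatch : ∀ p : List Char, '_' ∉ p → p = h →
            ((PySem.Chars.startswith (List.intercalate ['_'] (h :: t :: ts')) (p ++ ['_'])) = true) := by
          rintro p hp rfl
          rw [hA p hp]
          exact ⟨rfl, by simp⟩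
        simp only [pvPROVS, pvProvLoop, pvStage2]
        rw [if_neg hcof]
        rcases hs with rfl | rfl | rfl | rfl | rfl
        · rw [if_pos (hmatch _ (by decide) rfl), if_neg hb1, if_pos ⟨by simp, Or.inl (by simp)⟩,
              hfield _ rfl]
          simp
        · rw [if_neg (by rw [hA _ (by decide)]; rintro ⟨h3, -⟩; exact absurd h3 (by decide)),
              if_pos (hmatch _ (by decide) rfl), if_neg hb1,
              if_pos ⟨by simp, Or.inr (Or.inl (by simp))⟩, hfield _ rfl]
          simp
        · rw [if_neg (by rw [hA _ (by decide)]; rintro ⟨h3, -⟩; exact absurd h3 (by decide)),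
              if_neg (by rw [hA _ (by decide)]; rintro ⟨h3, -⟩; exact absurd h3 (by decide)),
              if_pos (hmatch _ (by decide) rfl), if_neg hb1,
              if_pos ⟨by simp, Or.inr (Or.inr (Or.inl (by simp)))⟩, hfield _ rfl]
          simp
        · rw [if_neg (by rw [hA _ (by decide)]; rintro ⟨h3, -⟩; exact absurd h3 (by decide)),
              if_neg (by rw [hA _ (by decide)]; rintro ⟨h3, -⟩; exact absurd h3 (by decide)),
              if_neg (by rw [hA _ (by decide)]; rintro ⟨h3, -⟩; exact absurd h3 (by decide)),
              if_pos (hmatch _ (by decide) rfl), if_neg hb1,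
              if_pos ⟨by simp, Or.inr (Or.inr (Or.inr (Or.inl (by simp))))⟩, hfield _ rfl]
          simp
        · rw [if_neg (by rw [hA _ (by decide)]; rintro ⟨h3, -⟩; exact absurd h3 (by decide)),
              if_neg (by rw [hA _ (by decide)]; rintro ⟨h3, -⟩; exact absurd h3 (by decide)),
              if_neg (by rw [hA _ (by decide)]; rintro ⟨h3, -⟩; exact absurd h3 (by decide)),
              if_neg (by rw [hA _ (by decide)]; rintro ⟨h3, -⟩; exact absurd h3 (by decide)),
              if_pos (hmatch _ (by decide) rfl), if_neg hb1,
              if_pos ⟨by simp, Or.inr (Or.inr (Or.inr (Or.inr (by simp))))⟩, hfield _ rfl]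
          simp
      · -- no provider matches at all
        push Not at hs
        obtain ⟨n1, n2, n3, n4, n5⟩ := hs
        simp only [pvPROVS, pvProvLoop, pvStage2]
        rw [if_neg hcof,
            if_neg (by rw [hA _ (by decide)]; rintro ⟨h3, -⟩; exact n1 h3.symm),
            if_neg (by rw [hA _ (by decide)]; rintro ⟨h3, -⟩; exact n2 h3.symm),
            if_neg (by rw [hA _ (by decide)]; rintro ⟨h3, -⟩; exact n3 h3.symm),
            if_neg (by rw [hA _ (by decide)]; rintro ⟨h3, -⟩; exact n4 h3.symm),
            if_neg (by rw [hA _ (by decide)]; rintro ⟨h3, -⟩; exact n5 h3.symm),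
            if_neg hb1,
            if_neg (by rintro ⟨-, h3⟩
                       simp only [List.getD_cons_zero] at h3
                       rcases h3 with h3 | h3 | h3 | h3 | h3
                       exacts [n1 h3, n2 h3, n3 h3, n4 h3, n5 h3]),
            pvOfNil]

-- the whole function on the uppercased character list
theorem pvCore (l : List Char) :
    pvProvLoop pvPROVS (pvScopeLoop pvSCOPES l).1 (pvScopeLoop pvSCOPES l).2 =
      (if (l.splitOn '_').length > 1 ∧ ((l.splitOn '_').getD 0 [] = "OCR".toList ∨
           (l.splitOn '_').getD 0 [] = "COLOR".toList ∨
           (l.splitOn '_').getD 0 [] = "RENDER".toList) then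
         pvStage2 ((l.splitOn '_').getD 0 [] ++ ['_']) ((l.splitOn '_').drop 1)
       else pvStage2 [] (l.splitOn '_')) := by
  have hnil : l.splitOn '_' ≠ [] := by
    simp only [List.splitOn]; exact List.splitOnP_ne_nil _ l
  obtain ⟨h, ts, htoks⟩ := List.exists_cons_of_ne_nil hnil
  have hfree := pvTokFree l
  rw [htoks] at hfree
  have hh : '_' ∉ h := hfree h (by simp)
  have hts : ∀ t ∈ ts, '_' ∉ t := fun t htm => hfree t (by simp [htm])
  have hl : List.intercalate ['_'] (h :: ts) = l := by
    rw [← htoks]; exact List.intercalate_splitOn l '_'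
  have hS : ∀ p : List Char, '_' ∉ p →
      ((PySem.Chars.startswith l (p ++ ['_'])) = true ↔ (p = h ∧ ts ≠ [])) := by
    intro p hp
    rw [PySem.Chars.startswith_iff, ← hl]
    have := pvG p [] h ts hp hh
    simpa using this
  rw [htoks]
  have eO : ("OCR_".toList : List Char) = "OCR".toList ++ ['_'] := by decide
  have eC : ("COLOR_".toList : List Char) = "COLOR".toList ++ ['_'] := by decide
  have eR : ("RENDER_".toList : List Char) = "RENDER".toList ++ ['_'] := by decide
  rcases ts with _ | ⟨t, ts'⟩
  · -- a single token: no scope prefix can match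
    simp only [pvSCOPES, pvScopeLoop]
    rw [eO, eC, eR,
        if_neg (by rw [hS _ (by decide)]; rintro ⟨-, h3⟩; exact h3 rfl),
        if_neg (by rw [hS _ (by decide)]; rintro ⟨-, h3⟩; exact h3 rfl),
        if_neg (by rw [hS _ (by decide)]; rintro ⟨-, h3⟩; exact h3 rfl),
        if_neg (by rintro ⟨h3, -⟩; simp at h3)]
    rw [← hl]
    exact pvProvEq [] h [] hh (by simp)
  · have hstrip : ∀ p : List Char, p = h →
        PySem.Chars.slice l (some (((p ++ ['_']).length : Nat) : Int)) none =
          List.intercalate ['_'] (t :: ts') := by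
      rintro p rfl
      rw [pvSliceFrom, ← hl, pvInterCons, show (p ++ ['_']).length = p.length + 1 from by simp,
          pvDropLemma]
    by_cases hO : h = "OCR".toList
    · simp only [pvSCOPES, pvScopeLoop]
      rw [eO, if_pos (by rw [hS _ (by decide)]; exact ⟨hO.symm, by simp⟩)]
      rw [show PySem.Chars.slice l (some ((("OCR".toList ++ ['_']).length : Nat) : Int)) none =
          List.intercalate ['_'] (t :: ts') from hstrip _ hO.symm]
      rw [if_pos ⟨by simp, Or.inl (by simp [hO])⟩]
      simp only [List.getD_cons_zero, List.drop_succ_cons, List.drop_zero]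
      rw [hO]
      exact pvProvEq _ t ts' (hts t (by simp)) (fun u hu => hts u (by simp [hu]))
    · by_cases hC : h = "COLOR".toList
      · simp only [pvSCOPES, pvScopeLoop]
        rw [eO, eC,
            if_neg (by rw [hS _ (by decide)]; rintro ⟨h3, -⟩; exact absurd (h3.trans hC) (by decide)),
            if_pos (by rw [hS _ (by decide)]; exact ⟨hC.symm, by simp⟩)]
        rw [show PySem.Chars.slice l (some ((("COLOR".toList ++ ['_']).length : Nat) : Int)) none =
            List.intercalate ['_'] (t :: ts') from hstrip _ hC.symm]
        rw [if_pos ⟨by simp, Or.inr (Or.inl (by simp [hC]))⟩]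
        simp only [List.getD_cons_zero, List.drop_succ_cons, List.drop_zero]
        rw [hC]
        exact pvProvEq _ t ts' (hts t (by simp)) (fun u hu => hts u (by simp [hu]))
      · by_cases hR : h = "RENDER".toList
        · simp only [pvSCOPES, pvScopeLoop]
          rw [eO, eC, eR,
              if_neg (by rw [hS _ (by decide)]; rintro ⟨h3, -⟩; exact absurd (h3.trans hR) (by decide)),
              if_neg (by rw [hS _ (by decide)]; rintro ⟨h3, -⟩; exact absurd (h3.trans hR) (by decide)),
              if_pos (by rw [hS _ (by decide)]; exact ⟨hR.symm, by simp⟩)]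
          rw [show PySem.Chars.slice l (some ((("RENDER".toList ++ ['_']).length : Nat) : Int)) none =
              List.intercalate ['_'] (t :: ts') from hstrip _ hR.symm]
          rw [if_pos ⟨by simp, Or.inr (Or.inr (by simp [hR]))⟩]
          simp only [List.getD_cons_zero, List.drop_succ_cons, List.drop_zero]
          rw [hR]
          exact pvProvEq _ t ts' (hts t (by simp)) (fun u hu => hts u (by simp [hu]))
        · simp only [pvSCOPES, pvScopeLoop]
          rw [eO, eC, eR,
              if_neg (by rw [hS _ (by decide)]; rintro ⟨h3, -⟩; exact hO h3.symm),
              if_neg (by rw [hS _ (by decide)]; rintro ⟨h3, -⟩; exact hC h3.symm),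
              if_neg (by rw [hS _ (by decide)]; rintro ⟨h3, -⟩; exact hR h3.symm),
              if_neg (by rintro ⟨-, h3⟩
                         simp only [List.getD_cons_zero] at h3
                         rcases h3 with h3 | h3 | h3
                         exacts [hO h3, hC h3, hR h3])]
          rw [← hl]
          exact pvProvEq [] h (t :: ts') hh hts

-- ===== VERDICT (by name: the statement is the Claim_ definition above) =====
theorem split_env_key_py_spec : Claim_equal_split_env_key_py := by
  intro e _
  unfold Spec_split_env_key_py split_env_key_py split_env_key_py_alt
  exact pvCore _
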